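-- pv_equiv track=rewrite | github.com/alexfoglia1/DSP | proto/zero.py | qgram_count
-- ===== SOURCE A (Python) =====
-- gamma = ['a','b','c','d','e','f','g','h','i','j','k','l','m','n','o','p','q','r','s','t','u','v','w','x','y','z']
--
-- def clean(text):
-- 	newstr = text.lower()
-- 	for ch in newstr:
-- 	    if ch not in gamma:
-- 	        newstr = newstr.replace(ch,'')
-- 	return newstr
--
-- def all_qgrams(q, text):
-- 	qgrams = []
-- 	i = 0
-- 	while i < len(text):
-- 		qgrams.append(text[i:i+q])
-- 		i = i + q
-- 	return qgrams
--
-- def qgram_count(q, text):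
-- 	text = clean(text)
-- 	qgrams = all_qgrams(q, text)
-- 	count = dict()
-- 	for qgram in qgrams:
-- 		i = 0
-- 		n = 0
-- 		while i < len(text):
-- 			if text[i:i+q] == qgram:
-- 				n = n + 1
-- 			i = i + q
-- 		count[qgram] = n
-- 	return count
-- ===== SOURCE B (Python) =====
-- def qgram_count(q, text):
--     low = text.lower()
--     delete_table = {ord(ch): None for ch in set(low) if not ('a' <= ch <= 'z')}
--     cleaned = low.translate(delete_table)
--     if not cleaned:
--         return {}
--     counts = {}
--     for i in range(0, len(cleaned), q):
--         g = cleaned[i:i + q]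
--         counts[g] = counts.get(g, 0) + 1
--     return counts
-- ===== Notes on version B (the rewrite author's own statement) =====
-- stated objective: faster
-- what changed: B cleans the text with a single character filter instead of A's repeated str.replace passes, and counts each q-gram in one dict-accumulating pass over the chunks instead of A's full rescan of the text for every chunk.
import Mathlib
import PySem

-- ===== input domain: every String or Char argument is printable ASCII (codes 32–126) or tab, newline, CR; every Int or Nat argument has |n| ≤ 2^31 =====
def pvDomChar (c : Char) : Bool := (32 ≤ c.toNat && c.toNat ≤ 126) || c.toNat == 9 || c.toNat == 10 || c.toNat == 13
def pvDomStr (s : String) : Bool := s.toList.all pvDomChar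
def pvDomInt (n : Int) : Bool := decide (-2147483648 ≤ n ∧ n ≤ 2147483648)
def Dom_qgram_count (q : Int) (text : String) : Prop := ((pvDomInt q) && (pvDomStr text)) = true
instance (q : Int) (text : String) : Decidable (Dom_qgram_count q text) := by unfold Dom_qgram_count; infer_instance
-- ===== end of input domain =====

-- B replaces A's per-distinct-qgram rescan of the chunk list by one counting pass with a dict
-- (and A's repeated str.replace cleaning by a single filter); objective: faster (one pass vs a rescan per chunk).

-- ===== PORT A =====
def gammaA : List Char :=
  ['a','b','c','d','e','f','g','h','i','j','k','l','m','n','o','p','q','r','s','t','u','v','w','x','y','z']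

-- clean(text): newstr = text.lower(); for ch in newstr: if ch not in gamma: newstr = newstr.replace(ch, '')
def cleanA (text : String) : List Char :=
  let newstr := PySem.Chars.lower text.toList
  newstr.foldl (fun ns ch => if !(gammaA.contains ch) then PySem.Chars.replace ns [ch] [] else ns) newstr

-- all_qgrams' while loop: i starts at 0, appends text[i:i+q], i += q.
-- fuel makes the recursion total; with fuel ≥ remaining length + 1 it never runs out when 1 ≤ q.
def allQgramsGo (q : Int) (cs : List Char) : Nat → Int → List (List Char)
  | 0, _ => []
  | fuel + 1, i =>
    if i < (cs.length : Int) then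
      PySem.List.slice cs (some i) (some (i + q)) :: allQgramsGo q cs fuel (i + q)
    else []

def allQgramsA (q : Int) (cs : List Char) : List (List Char) := allQgramsGo q cs (cs.length + 1) 0

-- the inner while loop of qgram_count: i = 0; n = 0; while i < len(text): if text[i:i+q] == qgram: n += 1; i += q
def countGo (q : Int) (cs : List Char) (g : List Char) : Nat → Int → Int → Int
  | 0, _, n => n
  | fuel + 1, i, n =>
    if i < (cs.length : Int) then
      countGo q cs g fuel (i + q) (if PySem.List.slice cs (some i) (some (i + q)) == g then n + 1 else n)
    else n

def qgram_count (q : Int) (text : String) : List (String × Int) :=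
  let t := cleanA text
  let qgrams := allQgramsA q t
  let count := qgrams.foldl
    (fun d qgram => d.insert qgram (countGo q t qgram (t.length + 1) 0 0)) PySem.Dict.empty
  count.items.map (fun p => (String.ofList p.1, p.2))

-- ===== PORT B =====
def qgram_count_alt (q : Int) (text : String) : List (String × Int) :=
  let cleaned := (PySem.Chars.lower text.toList).filter (fun ch => 'a' ≤ ch && ch ≤ 'z')
  if cleaned.isEmpty then []
  else
    let counts := (PySem.List.pyRange 0 (cleaned.length : Int) q).foldl
      (fun d i =>
        let g := PySem.List.slice cleaned (some i) (some (i + q))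
        d.insert g (d.getD g 0 + 1))
      PySem.Dict.empty
    counts.items.map (fun p => (String.ofList p.1, p.2))

-- ===== PRECONDITION & SPEC =====
-- Pre_ excludes exactly the inputs where A never returns: with q ≤ 0 and at least one
-- letter in the text, all_qgrams' while loop never advances i (infinite loop).
def Pre_qgram_count (q : Int) (text : String) : Prop :=
  1 ≤ q ∨ text.toList.all
    (fun c => !('a' ≤ PySem.Chars.lowerChar c && PySem.Chars.lowerChar c ≤ 'z')) = true
instance (q : Int) (text : String) : Decidable (Pre_qgram_count q text) := by
  unfold Pre_qgram_count; infer_instance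

def pvWitness_qgram_count : Int × String := (2, "Hello, World!")

def Spec_qgram_count (q : Int) (text : String) (out : List (String × Int)) : Prop :=
  out = qgram_count_alt q text
instance (q : Int) (text : String) (out : List (String × Int)) :
    Decidable (Spec_qgram_count q text out) := by unfold Spec_qgram_count; infer_instance

-- ===== CLAIM (what is proved, stated in full; the proofs are below) =====
def Claim_equal_qgram_count : Prop :=
  ∀ (q : Int) (text : String), Dom_qgram_count q text → Pre_qgram_count q text →
    Spec_qgram_count q text (qgram_count q text)

-- ===== LEMMAS AND PROOFS =====

theorem char_le_iff (a b : Char) : a ≤ b ↔ a.toNat ≤ b.toNat := by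
  rw [Char.le_def, UInt32.le_iff_toBitVec_le, BitVec.le_def]; rfl

theorem mem_gamma_of_bounds (c : Char) (h1 : 97 ≤ c.toNat) (h2 : c.toNat ≤ 122) : c ∈ gammaA := by
  unfold gammaA
  rw [(Char.ofNat_toNat c).symm]
  generalize c.toNat = n at h1 h2 ⊢
  interval_cases n <;> decide

theorem bounds_of_mem_gamma (c : Char) (h : c ∈ gammaA) : 97 ≤ c.toNat ∧ c.toNat ≤ 122 := by
  fin_cases h <;> exact ⟨by decide, by decide⟩

theorem contains_gamma (c : Char) : gammaA.contains c = ('a' ≤ c && c ≤ 'z') := by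
  by_cases h : c ∈ gammaA
  · have hb := bounds_of_mem_gamma c h
    have h1 : 'a' ≤ c := (char_le_iff 'a' c).mpr (by exact_mod_cast hb.1)
    have h2 : c ≤ 'z' := (char_le_iff c 'z').mpr (by exact_mod_cast hb.2)
    rw [List.contains_iff_mem.mpr h]
    simp [h1, h2]
  · have hnb : ¬(97 ≤ c.toNat ∧ c.toNat ≤ 122) := fun hb => h (mem_gamma_of_bounds c hb.1 hb.2)
    have hrhs : ('a' ≤ c && c ≤ 'z') = false := by
      cases hb : ('a' ≤ c && c ≤ 'z') with
      | false => rfl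
      | true =>
        exfalso; apply hnb
        simp only [Bool.and_eq_true, decide_eq_true_eq] at hb
        exact ⟨(char_le_iff 'a' c).mp hb.1, (char_le_iff c 'z').mp hb.2⟩
    have hcf : gammaA.contains c = false := by
      cases hcc : gammaA.contains c with
      | false => rfl
      | true => exact absurd (List.contains_iff_mem.mp hcc) h
    rw [hcf, hrhs]

-- str.replace with a one-char pattern and empty replacement is a filter
theorem replace_go_single (c : Char) :
    ∀ (fuel : Nat) (l acc : List Char), l.length ≤ fuel →
      PySem.Chars.replace.go [c] [] fuel l acc = acc.reverse ++ l.filter (fun x => !(x == c)) := by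
  intro fuel
  induction fuel with
  | zero =>
    intro l acc h
    have : l = [] := List.eq_nil_of_length_eq_zero (Nat.le_zero.mp h)
    subst this; simp [PySem.Chars.replace.go]
  | succ fuel ih =>
    intro l acc h
    cases l with
    | nil => simp [PySem.Chars.replace.go]
    | cons x t =>
      simp only [PySem.Chars.replace.go]
      by_cases hx : x = c
      · subst hx
        rw [if_pos (by simp [List.isPrefixOf])]
        rw [ih _ _ (by simpa using Nat.le_of_succ_le_succ h)]
        simp
      · rw [if_neg (by simp [List.isPrefixOf]; exact fun e => hx e.symm)]
        rw [ih _ _ (by simpa using Nat.le_of_succ_le_succ h)]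
        simp [hx]

theorem replace_single (s : List Char) (c : Char) :
    PySem.Chars.replace s [c] [] = s.filter (fun x => !(x == c)) := by
  unfold PySem.Chars.replace
  rw [if_neg (by simp)]
  simpa using replace_go_single c s.length s [] (le_refl _)

-- the clean() loop: repeatedly deleting every char seen that is outside gamma is a filter
theorem clean_foldl (cs : List Char) :
    ∀ s : List Char,
      cs.foldl (fun ns ch => if !(gammaA.contains ch) then PySem.Chars.replace ns [ch] [] else ns) s
        = s.filter (fun x => gammaA.contains x || !(cs.contains x)) := by
  induction cs with
  | nil => intro s; simp
  | cons ch cs ih =>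
    intro s
    rw [List.foldl_cons, ih]
    by_cases hm : ch ∈ gammaA
    · rw [if_neg (by simp [hm])]
      apply List.filter_congr
      intro x _
      by_cases hxc : x = ch
      · subst hxc; simp [hm]
      · simp [hxc]
    · rw [if_pos (by simp [hm]), replace_single, List.filter_filter]
      apply List.filter_congr
      intro x _
      by_cases hxc : x = ch
      · subst hxc; simp [hm]
      · simp [hxc]

theorem clean_eq (text : String) :
    cleanA text = (PySem.Chars.lower text.toList).filter (fun ch => 'a' ≤ ch && ch ≤ 'z') := by
  unfold cleanA
  rw [clean_foldl]
  rw [List.filter_congr (fun x hx => ?_)]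
  have : (PySem.Chars.lower text.toList).contains x = true := by
    rw [List.contains_iff_exists_mem_beq]; exact ⟨x, hx, by simp⟩
  rw [this, contains_gamma]; simp

-- pyRange with a positive step: induction forms
theorem pyRange_pos_nil (a b s : Int) (hs : 0 < s) (h : b ≤ a) : PySem.List.pyRange a b s = [] := by
  rw [PySem.List.pyRange_of_pos a b hs, if_neg (by omega)]; rfl

theorem pyRange_pos_cons (a b : Int) {s : Int} (hs : 0 < s) (hab : a < b) :
    PySem.List.pyRange a b s = a :: PySem.List.pyRange (a + s) b s := by
  rw [PySem.List.pyRange_of_pos a b hs, PySem.List.pyRange_of_pos (a + s) b hs]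
  rw [if_pos hab]
  have hd : (b - a + s - 1) / s = (b - a - 1) / s + 1 := by
    have := Int.add_mul_ediv_right (b - a - 1) 1 (by omega : s ≠ 0)
    rw [one_mul] at this; rw [show b - a + s - 1 = b - a - 1 + s by ring, this]
  have hnn : 0 ≤ (b - a - 1) / s := Int.ediv_nonneg (by omega) (by omega)
  rw [hd]
  have htn : ((b - a - 1) / s + 1).toNat = ((b - a - 1) / s).toNat + 1 := by omega
  rw [htn, List.range_succ_eq_map, List.map_cons, List.map_map]
  congr 1
  · omega
  by_cases h2 : a + s < b
  · rw [if_pos h2]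
    have hd2 : (b - (a + s) + s - 1) / s = (b - a - 1) / s := by
      rw [show b - (a + s) + s - 1 = b - a - 1 by ring]
    rw [hd2]
    apply List.map_congr_left
    intro k _
    simp [Function.comp]; ring
  · rw [if_neg h2]
    have : (b - a - 1) / s = 0 := Int.ediv_eq_zero_of_lt (by omega) (by omega)
    rw [this]; rfl

-- A's chunking loop is the q-gram list B reads off range(0, len, q)
theorem allQgramsGo_eq (q : Int) (hq : 1 ≤ q) (cs : List Char) :
    ∀ (fuel : Nat) (i : Int), 0 ≤ i → (cs.length : Int) - i ≤ fuel →
      allQgramsGo q cs fuel i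
        = (PySem.List.pyRange i (cs.length : Int) q).map
            (fun j => PySem.List.slice cs (some j) (some (j + q))) := by
  intro fuel
  induction fuel with
  | zero =>
    intro i h0 hf
    rw [allQgramsGo, pyRange_pos_nil _ _ _ (by omega) (by simpa using hf)]; rfl
  | succ fuel ih =>
    intro i h0 hf
    rw [allQgramsGo]
    by_cases hi : i < (cs.length : Int)
    · rw [if_pos hi, pyRange_pos_cons i _ (by omega) hi, List.map_cons,
        ih (i + q) (by omega) (by omega)]
    · rw [if_neg hi, pyRange_pos_nil _ _ _ (by omega) (by omega)]; rfl

theorem allQgramsA_eq (q : Int) (hq : 1 ≤ q) (cs : List Char) :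
    allQgramsA q cs
      = (PySem.List.pyRange 0 (cs.length : Int) q).map
          (fun j => PySem.List.slice cs (some j) (some (j + q))) := by
  unfold allQgramsA
  exact allQgramsGo_eq q hq cs (cs.length + 1) 0 (by omega) (by omega)

-- the inner rescan counts occurrences of g among the chunks
theorem countGo_eq (q : Int) (cs : List Char) (g : List Char) :
    ∀ (fuel : Nat) (i n : Int),
      countGo q cs g fuel i n = n + ((allQgramsGo q cs fuel i).count g : Int) := by
  intro fuel
  induction fuel with
  | zero => intro i n; rw [countGo, allQgramsGo]; simp
  | succ fuel ih =>
    intro i n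
    rw [countGo, allQgramsGo]
    by_cases hi : i < (cs.length : Int)
    · rw [if_pos hi, if_pos hi, ih, List.count_cons]
      by_cases hg : PySem.List.slice cs (some i) (some (i + q)) == g
      · rw [if_pos hg]; simp [hg]; ring
      · rw [if_neg hg]; simp [hg]
    · rw [if_neg hi, if_neg hi]; simp

-- a loop inserting a key-determined value builds the dict of first occurrences
theorem items_foldl_insert_value {κ : Type} [BEq κ] [LawfulBEq κ] (v : κ → Int) (l : List κ) :
    (l.foldl (fun d g => d.insert g (v g)) PySem.Dict.empty).items
      = (PySem.Set.ofList l).map (fun k => (k, v k)) := by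
  induction l using List.reverseRecOn with
  | nil => rfl
  | append_singleton l x ih =>
    rw [List.foldl_append, List.foldl_cons, List.foldl_nil]
    have hkeys : (l.foldl (fun d g => d.insert g (v g)) PySem.Dict.empty).keys
        = PySem.Set.ofList l := by
      rw [PySem.Dict.keys_foldl_insert]
      simp [PySem.Dict.keys_empty, PySem.Set.update_nil_left]
    by_cases hx : x ∈ l
    · have hmem : x ∈ PySem.Set.ofList l := by rw [PySem.Set.mem_ofList]; exact hx
      have hc : (l.foldl (fun d g => d.insert g (v g)) PySem.Dict.empty).contains x = true := by
        rw [PySem.Dict.contains_iff_mem_keys, hkeys]; exact hmem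
      rw [PySem.Dict.items_insert_of_contains _ _ hc, ih, List.map_map]
      rw [PySem.Set.ofList_append_singleton, PySem.Set.add_of_mem hmem]
      apply List.map_congr_left
      intro k _
      by_cases hk : k = x
      · subst hk; simp
      · simp [Function.comp]
        intro h; exact absurd h hk
    · have hmem : x ∉ PySem.Set.ofList l := fun h => hx (by rwa [PySem.Set.mem_ofList] at h)
      have hc : (l.foldl (fun d g => d.insert g (v g)) PySem.Dict.empty).contains x = false := by
        cases hcc : (l.foldl (fun d g => d.insert g (v g)) PySem.Dict.empty).contains x with
        | false => rfl
        | true => exact absurd ((PySem.Dict.contains_iff_mem_keys _ _).mp hcc) (by rw [hkeys]; exact hmem)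
      rw [PySem.Dict.items_insert_of_not_contains _ _ hc, ih]
      rw [PySem.Set.ofList_append_singleton, PySem.Set.add_of_not_mem hmem, List.map_append]
      rfl

-- if the text has no letters, both cleanings are empty
theorem clean_empty_of_all_nonletter (text : String)
    (h : text.toList.all
      (fun c => !('a' ≤ PySem.Chars.lowerChar c && PySem.Chars.lowerChar c ≤ 'z')) = true) :
    (PySem.Chars.lower text.toList).filter (fun ch => 'a' ≤ ch && ch ≤ 'z') = [] := by
  rw [PySem.Chars.lower, List.filter_map, List.map_eq_nil_iff, List.filter_eq_nil_iff]
  intro c hc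
  have h2 := List.all_eq_true.mp h c hc
  simp only [Bool.not_eq_true'] at h2
  simp [Function.comp, h2]

-- ===== VERDICT (by name: the statement is the Claim_ definition above) =====
theorem qgram_count_spec : Claim_equal_qgram_count := by
  intro q text _hdom hpre
  unfold Spec_qgram_count qgram_count qgram_count_alt
  rw [clean_eq]
  set c := (PySem.Chars.lower text.toList).filter (fun ch => 'a' ≤ ch && ch ≤ 'z') with hc
  by_cases hne : c = []
  · rw [hne]
    simp [allQgramsA, allQgramsGo]
    rfl
  · have hq : 1 ≤ q := by
      rcases hpre with hq | hall
      · exact hq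
      · exact absurd (hc ▸ clean_empty_of_all_nonletter text hall) hne
    rw [if_neg (by simpa [List.isEmpty_iff] using hne)]
    -- A's side: rewrite the inner count, then both item lists are the counter's items
    have hAv : ∀ g, countGo q c g (c.length + 1) 0 0 = ((allQgramsA q c).count g : Int) := by
      intro g
      rw [countGo_eq q c g (c.length + 1) 0 0]
      unfold allQgramsA
      simp
    simp only [hAv]
    rw [items_foldl_insert_value (fun g => ((allQgramsA q c).count g : Int)) (allQgramsA q c)]
    -- B's side
    have hB : (List.foldl
          (fun d i => PySem.Dict.insert d (PySem.List.slice c (some i) (some (i + q)))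
              (PySem.Dict.getD d (PySem.List.slice c (some i) (some (i + q))) 0 + 1))
          PySem.Dict.empty (PySem.List.pyRange 0 (c.length : Int) q))
        = PySem.Dict.counter (allQgramsA q c) := by
      rw [allQgramsA_eq q hq c, ← PySem.Dict.foldl_insert_getD_add_one_eq_counter,
        List.foldl_map]
    rw [hB, PySem.Dict.items_counter]
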